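-- pv_equiv track=rewrite | github.com/dxhw/Terminal-Games | Snake/snake_ai.py | simple_ai_direction_chooser
-- ===== SOURCE A (Python) =====
-- def signof(x):
--     if x >= 0: # need to also go on equal so that the direction is not (0, 0)
--         return 1
--     else:
--         return -1
--
-- def ai_headed_towards_food(current_dir, x_from_food, y_from_food):
--     dx, dy = current_dir
--     return dx * x_from_food + dy * y_from_food > 0
--
-- def naive_direction_chooser(current_dir, head_pos, food_pos):
--     x_from_food = food_pos[0] - head_pos[0]
--     y_from_food = food_pos[1] - head_pos[1]
--     if ai_headed_towards_food(current_dir, x_from_food, y_from_food):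
--         if current_dir[0] != 0:
--             return [current_dir, (0, signof(y_from_food)), (0, -signof(y_from_food))]
--         return [current_dir, (signof(x_from_food), 0), (-signof(x_from_food), 0)]
--     if abs(x_from_food) > abs(y_from_food):
--         return [(signof(x_from_food), 0), (0, signof(y_from_food)), (0, -signof(y_from_food)), (-signof(x_from_food), 0)]
--     return [(0, signof(y_from_food)), (signof(x_from_food), 0), (-signof(x_from_food), 0), (0, -signof(y_from_food))]
--
-- def check_if_will_kill(move_dir, ai_snake, snake, grid_width, grid_height):
--     x, y = ai_snake[0]
--     x, y = x + move_dir[0], y + move_dir[1]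
--     return (
--         x <= 0 or x >= grid_width - 1 or
--         y <= 0 or y >= grid_height - 1 or
--         (x, y) in ai_snake or (x, y) in snake
--     )
--
-- def has_future_escape(move_dir, ai_snake, snake, grid_width, grid_height):
--     """Simulate moving one step and check if any future move will be safe."""
--     new_head = (ai_snake[0][0] + move_dir[0], ai_snake[0][1] + move_dir[1])
--     new_snake = [new_head] + ai_snake[:-1]  # simulate move without growing
--     possible_dirs = [(1,0), (-1,0), (0,1), (0,-1)]
--     for nd in possible_dirs:
--         x, y = new_head[0] + nd[0], new_head[1] + nd[1]
--         if not (
--             x <= 0 or x >= grid_width - 1 or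
--             y <= 0 or y >= grid_height - 1 or
--             (x, y) in new_snake or (x, y) in snake
--         ):
--             return True
--     return False
--
-- def simple_ai_direction_chooser(current_dir, ai_snake, snake, food_pos, grid_width, grid_height):
--     dirs = naive_direction_chooser(current_dir, ai_snake[0], food_pos)
--     # Prefer a direction that is immediately safe and has a future escape
--     for d in dirs:
--         if not check_if_will_kill(d, ai_snake, snake, grid_width, grid_height) and has_future_escape(d, ai_snake, snake, grid_width, grid_height):
--             return d
--
--     # If none have a guaranteed escape, pick any immediately safe one
--     for d in dirs:
--         if not check_if_will_kill(d, ai_snake, snake, grid_width, grid_height):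
--             return d
--
--     # If no move is safe, accept fate
--     return dirs[0]
-- ===== SOURCE B (Python) =====
-- def _in_bounds(x, y, grid_width, grid_height):
--     return 0 < x < grid_width - 1 and 0 < y < grid_height - 1
--
-- def _cell_free(pos, body, other, grid_width, grid_height):
--     return _in_bounds(pos[0], pos[1], grid_width, grid_height) and pos not in body and pos not in other
--
-- def _rank(d, ai_snake, snake, grid_width, grid_height):
--     """0 = safe with a future escape, 1 = safe but trapped next turn, 2 = immediately fatal."""
--     head = ai_snake[0]
--     nh = (head[0] + d[0], head[1] + d[1])
--     if not _cell_free(nh, ai_snake, snake, grid_width, grid_height):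
--         return 2
--     moved = [nh] + ai_snake[:-1]
--     if any(_cell_free((nh[0] + dx, nh[1] + dy), moved, snake, grid_width, grid_height)
--            for dx, dy in ((1, 0), (-1, 0), (0, 1), (0, -1))):
--         return 0
--     return 1
--
-- def _candidates(current_dir, head_pos, food_pos):
--     fx = food_pos[0] - head_pos[0]
--     fy = food_pos[1] - head_pos[1]
--     sx = -1 if fx < 0 else 1
--     sy = -1 if fy < 0 else 1
--     xs = [(sx, 0), (-sx, 0)]
--     ys = [(0, sy), (0, -sy)]
--     if current_dir[0] * fx + current_dir[1] * fy > 0: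
--         return [current_dir] + (ys if current_dir[0] != 0 else xs)
--     if abs(fx) > abs(fy):
--         return [xs[0]] + ys + [xs[1]]
--     return [ys[0]] + xs + [ys[1]]
--
-- def simple_ai_direction_chooser(current_dir, ai_snake, snake, food_pos, grid_width, grid_height):
--     # Score every candidate once (0 best), then take the first candidate with minimal score.
--     dirs = _candidates(current_dir, ai_snake[0], food_pos)
--     best = dirs[0]
--     best_rank = _rank(best, ai_snake, snake, grid_width, grid_height)
--     for d in dirs[1:]:
--         r = _rank(d, ai_snake, snake, grid_width, grid_height)
--         if r < best_rank:
--             best, best_rank = d, r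
--     return best
-- ===== Notes on version B (the rewrite author's own statement) =====
-- stated objective: alternative
-- what changed: Instead of A's two sequential short-circuiting scans over the candidate list (first safe+future-escape, then merely safe, then dirs[0]), B scores every candidate once with a rank (0 = safe with escape, 1 = safe but trapped, 2 = fatal) and returns the first candidate of minimal rank via an explicit argmin loop; the helpers are also refactored around a single cell-free predicate instead of the kill/escape pair.
import Mathlib
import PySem

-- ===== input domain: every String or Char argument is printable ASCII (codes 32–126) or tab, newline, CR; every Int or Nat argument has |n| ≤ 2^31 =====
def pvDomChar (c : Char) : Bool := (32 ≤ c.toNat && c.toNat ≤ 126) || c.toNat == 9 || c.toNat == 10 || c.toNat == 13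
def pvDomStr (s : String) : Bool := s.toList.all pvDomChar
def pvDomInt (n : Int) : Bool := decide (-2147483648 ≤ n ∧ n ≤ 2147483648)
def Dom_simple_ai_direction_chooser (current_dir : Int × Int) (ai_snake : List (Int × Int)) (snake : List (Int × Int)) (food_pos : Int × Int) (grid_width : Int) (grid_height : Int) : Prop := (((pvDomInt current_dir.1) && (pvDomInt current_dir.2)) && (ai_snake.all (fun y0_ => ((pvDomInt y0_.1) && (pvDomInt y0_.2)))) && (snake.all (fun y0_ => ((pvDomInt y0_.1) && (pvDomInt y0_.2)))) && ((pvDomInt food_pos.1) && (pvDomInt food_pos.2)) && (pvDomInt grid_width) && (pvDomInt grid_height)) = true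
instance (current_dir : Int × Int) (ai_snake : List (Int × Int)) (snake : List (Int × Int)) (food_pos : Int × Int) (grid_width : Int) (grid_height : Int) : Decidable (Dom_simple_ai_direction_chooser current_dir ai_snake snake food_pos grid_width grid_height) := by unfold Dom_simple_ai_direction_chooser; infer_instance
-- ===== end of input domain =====

-- B replaces A's two short-circuiting scans (safe+escape, then merely safe, then dirs[0])
-- by scoring every candidate once with a rank 0/1/2 and taking the first candidate of
-- minimal rank (objective: alternative decomposition, same cost).

-- ===== PORT A =====
def signof (x : Int) : Int := if x ≥ 0 then 1 else -1

def ai_headed_towards_food (current_dir : Int × Int) (x_from_food y_from_food : Int) : Bool :=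
  decide (current_dir.1 * x_from_food + current_dir.2 * y_from_food > 0)

def naive_direction_chooser (current_dir head_pos food_pos : Int × Int) : List (Int × Int) :=
  let xf := food_pos.1 - head_pos.1
  let yf := food_pos.2 - head_pos.2
  if ai_headed_towards_food current_dir xf yf then
    if current_dir.1 ≠ 0 then [current_dir, (0, signof yf), (0, -signof yf)]
    else [current_dir, (signof xf, 0), (-signof xf, 0)]
  else if |xf| > |yf| then
    [(signof xf, 0), (0, signof yf), (0, -signof yf), (-signof xf, 0)]
  else
    [(0, signof yf), (signof xf, 0), (-signof xf, 0), (0, -signof yf)]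

-- ai_snake[0]: IndexError on ai_snake = [] is excluded by Pre_
def check_if_will_kill (move_dir : Int × Int) (ai_snake snake : List (Int × Int)) (grid_width grid_height : Int) : Bool :=
  let h := (PySem.List.pyGet? ai_snake 0).getD (0, 0)
  let x := h.1 + move_dir.1
  let y := h.2 + move_dir.2
  decide (x ≤ 0) || decide (x ≥ grid_width - 1) || decide (y ≤ 0) || decide (y ≥ grid_height - 1) ||
    ai_snake.contains (x, y) || snake.contains (x, y)

def has_future_escape (move_dir : Int × Int) (ai_snake snake : List (Int × Int)) (grid_width grid_height : Int) : Bool :=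
  let h := (PySem.List.pyGet? ai_snake 0).getD (0, 0)
  let new_head := (h.1 + move_dir.1, h.2 + move_dir.2)
  let new_snake := new_head :: PySem.List.slice ai_snake none (some (-1))   -- [new_head] + ai_snake[:-1]
  let possible_dirs : List (Int × Int) := [(1,0), (-1,0), (0,1), (0,-1)]
  possible_dirs.any (fun nd =>
    let x := new_head.1 + nd.1
    let y := new_head.2 + nd.2
    !(decide (x ≤ 0) || decide (x ≥ grid_width - 1) || decide (y ≤ 0) || decide (y ≥ grid_height - 1) ||
      new_snake.contains (x, y) || snake.contains (x, y)))

-- A: first scan for a safe direction with a future escape, second scan for any safe one, else dirs[0]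
def simple_ai_direction_chooser (current_dir : Int × Int) (ai_snake : List (Int × Int)) (snake : List (Int × Int)) (food_pos : Int × Int) (grid_width : Int) (grid_height : Int) : Int × Int :=
  let head := (PySem.List.pyGet? ai_snake 0).getD (0, 0)
  let dirs := naive_direction_chooser current_dir head food_pos
  match dirs.find? (fun d => !check_if_will_kill d ai_snake snake grid_width grid_height &&
                             has_future_escape d ai_snake snake grid_width grid_height) with
  | some d => d
  | none =>
    match dirs.find? (fun d => !check_if_will_kill d ai_snake snake grid_width grid_height) with
    | some d => d
    | none => (PySem.List.pyGet? dirs 0).getD (0, 0)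

-- ===== PORT B =====
def pvInBounds (x y grid_width grid_height : Int) : Bool :=
  decide (0 < x) && decide (x < grid_width - 1) && decide (0 < y) && decide (y < grid_height - 1)

def pvCellFree (pos : Int × Int) (body other : List (Int × Int)) (grid_width grid_height : Int) : Bool :=
  pvInBounds pos.1 pos.2 grid_width grid_height && !body.contains pos && !other.contains pos

-- 0 = safe with future escape, 1 = safe but trapped, 2 = immediately fatal
def pvRank (d : Int × Int) (ai_snake snake : List (Int × Int)) (grid_width grid_height : Int) : Nat :=
  let head := (PySem.List.pyGet? ai_snake 0).getD (0, 0)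
  let nh := (head.1 + d.1, head.2 + d.2)
  if !pvCellFree nh ai_snake snake grid_width grid_height then 2
  else
    let moved := nh :: PySem.List.slice ai_snake none (some (-1))   -- [nh] + ai_snake[:-1]
    if ([((1:Int),(0:Int)), (-1,0), (0,1), (0,-1)]).any
         (fun nd => pvCellFree (nh.1 + nd.1, nh.2 + nd.2) moved snake grid_width grid_height)
    then 0 else 1

def pvSign (x : Int) : Int := if x < 0 then -1 else 1

def pvCandidates (current_dir head_pos food_pos : Int × Int) : List (Int × Int) :=
  let fx := food_pos.1 - head_pos.1
  let fy := food_pos.2 - head_pos.2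
  let sx := pvSign fx
  let sy := pvSign fy
  let xs : List (Int × Int) := [(sx, 0), (-sx, 0)]
  let ys : List (Int × Int) := [(0, sy), (0, -sy)]
  if current_dir.1 * fx + current_dir.2 * fy > 0 then
    [current_dir] ++ (if current_dir.1 ≠ 0 then ys else xs)
  else if |fx| > |fy| then
    [xs[0]!] ++ ys ++ [xs[1]!]
  else
    [ys[0]!] ++ xs ++ [ys[1]!]

-- the explicit argmin loop of Source B: best-so-far and its rank, strict improvement only
def pvArgmin (rank : (Int × Int) → Nat) : List (Int × Int) → (Int × Int) → Nat → (Int × Int)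
  | [], best, _ => best
  | d :: ds, best, best_rank =>
    let r := rank d
    if r < best_rank then pvArgmin rank ds d r else pvArgmin rank ds best best_rank

def simple_ai_direction_chooser_alt (current_dir : Int × Int) (ai_snake : List (Int × Int)) (snake : List (Int × Int)) (food_pos : Int × Int) (grid_width : Int) (grid_height : Int) : Int × Int :=
  let head := (PySem.List.pyGet? ai_snake 0).getD (0, 0)
  let dirs := pvCandidates current_dir head food_pos
  let best := (PySem.List.pyGet? dirs 0).getD (0, 0)
  let best_rank := pvRank best ai_snake snake grid_width grid_height
  pvArgmin (fun d => pvRank d ai_snake snake grid_width grid_height)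
    (PySem.List.slice dirs (some 1) none) best best_rank

-- ===== PRECONDITION & SPEC =====
-- Pre_ excludes only ai_snake = [], on which the Python A raises IndexError (ai_snake[0]).
def Pre_simple_ai_direction_chooser (current_dir : Int × Int) (ai_snake : List (Int × Int)) (snake : List (Int × Int)) (food_pos : Int × Int) (grid_width : Int) (grid_height : Int) : Prop := ai_snake ≠ []
instance (current_dir : Int × Int) (ai_snake : List (Int × Int)) (snake : List (Int × Int)) (food_pos : Int × Int) (grid_width : Int) (grid_height : Int) : Decidable (Pre_simple_ai_direction_chooser current_dir ai_snake snake food_pos grid_width grid_height) := by unfold Pre_simple_ai_direction_chooser; infer_instance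

def pvWitness_simple_ai_direction_chooser : (Int × Int) × (List (Int × Int)) × (List (Int × Int)) × (Int × Int) × Int × Int := ((1, 0), [(2, 2)], [(4, 4)], (4, 2), 6, 6)

def Spec_simple_ai_direction_chooser (current_dir : Int × Int) (ai_snake : List (Int × Int)) (snake : List (Int × Int)) (food_pos : Int × Int) (grid_width : Int) (grid_height : Int) (out : Int × Int) : Prop := out = simple_ai_direction_chooser_alt current_dir ai_snake snake food_pos grid_width grid_height
instance (current_dir : Int × Int) (ai_snake : List (Int × Int)) (snake : List (Int × Int)) (food_pos : Int × Int) (grid_width : Int) (grid_height : Int) (out : Int × Int) : Decidable (Spec_simple_ai_direction_chooser current_dir ai_snake snake food_pos grid_width grid_height out) := by unfold Spec_simple_ai_direction_chooser; infer_instance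

-- ===== CLAIM (what is proved, stated in full; the proofs are below) =====
def Claim_equal_simple_ai_direction_chooser : Prop := ∀ (current_dir : Int × Int) (ai_snake : List (Int × Int)) (snake : List (Int × Int)) (food_pos : Int × Int) (grid_width : Int) (grid_height : Int), Dom_simple_ai_direction_chooser current_dir ai_snake snake food_pos grid_width grid_height → Pre_simple_ai_direction_chooser current_dir ai_snake snake food_pos grid_width grid_height → Spec_simple_ai_direction_chooser current_dir ai_snake snake food_pos grid_width grid_height (simple_ai_direction_chooser current_dir ai_snake snake food_pos grid_width grid_height)

-- ===== LEMMAS AND PROOFS =====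

lemma sign_eq (x : Int) : signof x = pvSign x := by
  unfold signof pvSign; split_ifs with h1 h2 <;> omega

lemma candidates_eq (cd h f : Int × Int) :
    naive_direction_chooser cd h f = pvCandidates cd h f := by
  unfold naive_direction_chooser pvCandidates ai_headed_towards_food
  simp only [sign_eq, decide_eq_true_eq]
  split_ifs <;> simp

-- pvCellFree is the negation of A's kill/blocked disjunction
lemma cellFree_eq (p : Int × Int) (body other : List (Int × Int)) (gw gh : Int) :
    pvCellFree p body other gw gh =
      !(decide (p.1 ≤ 0) || decide (p.1 ≥ gw - 1) || decide (p.2 ≤ 0) || decide (p.2 ≥ gh - 1) ||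
        body.contains p || other.contains p) := by
  simp only [pvCellFree, pvInBounds, List.contains_eq_mem, Bool.not_or, ← decide_not,
    ge_iff_le, Int.not_le, Bool.and_assoc]

-- the rank classifies A's kill/escape tests exactly
lemma rank_eq (d : Int × Int) (ai sn : List (Int × Int)) (gw gh : Int) :
    pvRank d ai sn gw gh =
      if check_if_will_kill d ai sn gw gh then 2
      else if has_future_escape d ai sn gw gh then 0 else 1 := by
  unfold pvRank check_if_will_kill has_future_escape
  simp only [cellFree_eq, Bool.not_not]

lemma rank_le_two (d : Int × Int) (ai sn : List (Int × Int)) (gw gh : Int) :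
    pvRank d ai sn gw gh ≤ 2 := by
  rw [rank_eq]; split_ifs <;> omega

-- the argmin loop characterised against the two find? scans (ranks only take values 0, 1, 2)
lemma argmin_spec (rank : (Int × Int) → Nat) (hr : ∀ d, rank d ≤ 2) :
    ∀ (ds : List (Int × Int)) (b : Int × Int),
      pvArgmin rank ds b (rank b) =
        if rank b = 0 then b
        else match ds.find? (fun d => rank d == 0) with
        | some d => d
        | none =>
          if rank b ≤ 1 then b
          else match ds.find? (fun d => decide (rank d ≤ 1)) with
            | some d => d
            | none => b := by
  intro ds
  induction ds with
  | nil => intro b; split_ifs <;> simp [pvArgmin]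
  | cons d ds ih =>
    intro b
    have hb := hr b
    have hd := hr d
    by_cases hlt : rank d < rank b
    · have hstep : pvArgmin rank (d :: ds) b (rank b) = pvArgmin rank ds d (rank d) := by
        simp [pvArgmin, hlt]
      rw [hstep, ih d]
      by_cases h0 : rank d = 0
      · have hbne : rank b ≠ 0 := by omega
        simp [List.find?_cons, h0, hbne]
      · have h1 : rank d = 1 := by omega
        have hb2 : rank b = 2 := by omega
        have e0 : (rank d == 0) = false := by simp [h0]
        have e1 : decide (rank d ≤ 1) = true := by simp [h1]
        simp [List.find?_cons, e0, e1, h1, hb2]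
    · have hstep : pvArgmin rank (d :: ds) b (rank b) = pvArgmin rank ds b (rank b) := by
        simp [pvArgmin, hlt]
      rw [hstep, ih b]
      by_cases hb0 : rank b = 0
      · simp [hb0]
      · have hd0 : (rank d == 0) = false := by simp; omega
        by_cases hb1 : rank b ≤ 1
        · simp [List.find?_cons, hd0, hb0, hb1]
        · have hd1 : decide (rank d ≤ 1) = false := by simp; omega
          simp [List.find?_cons, hd0, hd1, hb0, hb1]

-- find? only depends on the predicate extensionally
lemma find?_ext {p q : (Int × Int) → Bool} (h : ∀ d, p d = q d) :
    ∀ l : List (Int × Int), l.find? p = l.find? q := by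
  intro l
  induction l with
  | nil => rfl
  | cons a l ih => simp [List.find?_cons, h a, ih]

-- find?-predicate bridges: A's boolean tests expressed through the rank
lemma pred0_eq (ai sn : List (Int × Int)) (gw gh : Int) (d : Int × Int) :
    (!check_if_will_kill d ai sn gw gh && has_future_escape d ai sn gw gh) =
      (pvRank d ai sn gw gh == 0) := by
  rw [rank_eq]
  cases hk : check_if_will_kill d ai sn gw gh <;>
    cases he : has_future_escape d ai sn gw gh <;> simp

lemma pred1_eq (ai sn : List (Int × Int)) (gw gh : Int) (d : Int × Int) :
    (!check_if_will_kill d ai sn gw gh) = decide (pvRank d ai sn gw gh ≤ 1) := by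
  rw [rank_eq]
  cases hk : check_if_will_kill d ai sn gw gh <;>
    cases he : has_future_escape d ai sn gw gh <;> simp

-- the candidate list is never empty
lemma candidates_ne_nil (cd h f : Int × Int) : pvCandidates cd h f ≠ [] := by
  unfold pvCandidates
  by_cases h1 : cd.1 * (f.1 - h.1) + cd.2 * (f.2 - h.2) > 0 <;>
    by_cases h2 : cd.1 ≠ 0 <;>
    by_cases h3 : |f.1 - h.1| > |f.2 - h.2| <;>
    simp [h1, h2, h3]

-- ===== VERDICT (by name: the statement is the Claim_ definition above) =====
theorem simple_ai_direction_chooser_spec : Claim_equal_simple_ai_direction_chooser := by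
  intro cd ai sn fp gw gh _ _
  unfold Spec_simple_ai_direction_chooser
  simp only [simple_ai_direction_chooser, simple_ai_direction_chooser_alt]
  rw [candidates_eq]
  obtain ⟨b0, rest, hd⟩ : ∃ b0 rest,
      pvCandidates cd ((PySem.List.pyGet? ai 0).getD (0, 0)) fp = b0 :: rest := by
    cases hc : pvCandidates cd ((PySem.List.pyGet? ai 0).getD (0, 0)) fp with
    | nil => exact absurd hc (candidates_ne_nil _ _ _)
    | cons b0 rest => exact ⟨b0, rest, rfl⟩
  rw [hd]
  have hget0 : (PySem.List.pyGet? (b0 :: rest) 0).getD ((0 : Int), (0 : Int)) = b0 := by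
    simp [PySem.List.pyGet?, PySem.List.pyIdx?]
  rw [PySem.List.slice_from_one, hget0, List.tail_cons]
  set rank := fun d => pvRank d ai sn gw gh with hrank
  have hfind0 :
      (b0 :: rest).find? (fun d => !check_if_will_kill d ai sn gw gh &&
        has_future_escape d ai sn gw gh) = (b0 :: rest).find? (fun d => rank d == 0) := by
    exact find?_ext (fun d => pred0_eq ai sn gw gh d) _
  have hfind1 :
      (b0 :: rest).find? (fun d => !check_if_will_kill d ai sn gw gh) =
      (b0 :: rest).find? (fun d => decide (rank d ≤ 1)) := by
    exact find?_ext (fun d => pred1_eq ai sn gw gh d) _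
  rw [hfind0, hfind1, argmin_spec rank (fun d => rank_le_two d ai sn gw gh) rest b0]
  have hb2 : rank b0 ≤ 2 := rank_le_two b0 ai sn gw gh
  by_cases hb0 : rank b0 = 0
  · have e0 : (rank b0 == 0) = true := by simp [hb0]
    simp [List.find?_cons, e0, hb0]
  · have e0 : (rank b0 == 0) = false := by simp [hb0]
    rw [List.find?_cons]
    rw [e0]
    simp only [hb0, if_false]
    cases hf : rest.find? (fun d => rank d == 0) with
    | some dd => simp
    | none =>
      by_cases hb1 : rank b0 ≤ 1
      · have e1 : decide (rank b0 ≤ 1) = true := by simp [hb1]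
        simp [List.find?_cons, e1, hb1]
      · have e1 : decide (rank b0 ≤ 1) = false := by simp [hb1]
        simp only [List.find?_cons, e1, hb1, if_false]
        cases hf2 : rest.find? (fun d => decide (rank d ≤ 1)) with
        | some dd => simp
        | none => simp
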